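-- pv_equiv track=rewrite | github.com/Mikhail-Fediukin/Algorithms-2-Sem | Лаб 2_1/21.py | durak
-- ===== SOURCE A (Python) =====
-- Ranks = {'S': 0,
--          'C': 1,
--          'D': 2,
--          'H': 3}
--
-- Suits = {'6': 0,
--          '7': 1,
--          '8': 2,
--          '9': 3,
--          'T': 4,
--          'J': 5,
--          'Q': 6,
--          'K': 7,
--          'A': 8}
--
-- def durak(trump_card, me, opponent):
--     m = [[0 for _ in range(9)] for _ in range(4)]
--     for item in me:
--         m[Ranks[item[1]]][Suits[item[0]]] = 1
--     for item in opponent: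
--         row, col = Ranks[item[1]], Suits[item[0]]
--         flag = True
--         for j in range(col, 9):
--             if m[row][j] != 0:
--                 m[row][j] = 0
--                 flag = False
--                 break
--         if flag and row != Ranks[trump_card]:
--             flag = True
--             row, col = Ranks[trump_card], 0
--             for j in range(col, 9):
--                 if m[row][j] != 0:
--                     m[row][j] = 0
--                     flag = False
--                     break
--         if flag:
--             return "NO"
--     return "YES"
-- ===== SOURCE B (Python) =====
-- # B: per-suit sorted rank lists + binary search for the lowest beater, instead of a 4x9 grid with inner scans.
-- SUIT = {'S': 0, 'C': 1, 'D': 2, 'H': 3}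
-- RANK = {'6': 0, '7': 1, '8': 2, '9': 3, 'T': 4, 'J': 5, 'Q': 6, 'K': 7, 'A': 8}
--
--
-- def _bisect_left(a, x):
--     lo, hi = 0, len(a)
--     while lo < hi:
--         mid = (lo + hi) // 2
--         if a[mid] < x:
--             lo = mid + 1
--         else:
--             hi = mid
--     return lo
--
--
-- def durak(trump_card, me, opponent):
--     present = set()
--     for c in me:
--         present.add((SUIT[c[1]], RANK[c[0]]))
--     avail = [[r for r in range(9) if (s, r) in present] for s in range(4)]
--     for c in opponent:
--         s, r = SUIT[c[1]], RANK[c[0]]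
--         lst = avail[s]
--         i = _bisect_left(lst, r)
--         if i < len(lst):
--             lst.pop(i)
--         elif s != (t := SUIT[trump_card]) and avail[t]:
--             avail[t].pop(0)
--         else:
--             return "NO"
--     return "YES"
-- ===== Notes on version B (the rewrite author's own statement) =====
-- stated objective: idiomatic
-- what changed: Replaces the 4x9 0/1 grid with its fixed left-to-right inner scans by per-suit sorted lists of available ranks, locating the lowest beater with a binary search (bisect_left) and popping it (or the lowest trump) from the list.
-- outside the precondition, e.g. on durak('X', ['6S'], ['6S']): A returns 'YES', B returns 'YES'; on durak('S', [], ['6S', '@@']): A returns 'NO', B returns 'NO'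
import Mathlib
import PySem

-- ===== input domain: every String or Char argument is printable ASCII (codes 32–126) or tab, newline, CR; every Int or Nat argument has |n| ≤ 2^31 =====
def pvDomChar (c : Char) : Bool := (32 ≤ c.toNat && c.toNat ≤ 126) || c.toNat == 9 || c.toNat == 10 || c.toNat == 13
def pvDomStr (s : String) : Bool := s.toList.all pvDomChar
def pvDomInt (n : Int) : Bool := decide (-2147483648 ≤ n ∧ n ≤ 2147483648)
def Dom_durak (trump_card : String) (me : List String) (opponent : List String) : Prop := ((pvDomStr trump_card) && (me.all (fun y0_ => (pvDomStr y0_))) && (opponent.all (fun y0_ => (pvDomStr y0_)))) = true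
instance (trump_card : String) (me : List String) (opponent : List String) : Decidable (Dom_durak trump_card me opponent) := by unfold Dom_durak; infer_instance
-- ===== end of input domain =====

-- B replaces A's 4x9 grid and fixed inner scans by per-suit sorted rank lists with a binary search (alternative data structure; not measured faster).


-- ===== PORT A =====
-- item[i] on a string; Pre_ keeps the index in range (IndexError excluded)
def pvChA (s : String) (i : Nat) : Char := s.toList.getD i '?'
-- Ranks[·] (A's dict keyed by the suit letter); Pre_ keeps the key valid (KeyError excluded)
def ranksA (c : Char) : Nat :=
  if c = 'S' then 0 else if c = 'C' then 1 else if c = 'D' then 2 else if c = 'H' then 3 else 0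
-- Suits[·] (A's dict keyed by the rank character); Pre_ keeps the key valid (KeyError excluded)
def suitsA (c : Char) : Nat :=
  if c = '6' then 0 else if c = '7' then 1 else if c = '8' then 2 else if c = '9' then 3
  else if c = 'T' then 4 else if c = 'J' then 5 else if c = 'Q' then 6 else if c = 'K' then 7
  else if c = 'A' then 8 else 0
-- m[Ranks[item[1]]][Suits[item[0]]] = 1
def markA (m : List (List Int)) (item : String) : List (List Int) :=
  m.set (ranksA (pvChA item 1)) ((m.getD (ranksA (pvChA item 1)) []).set (suitsA (pvChA item 0)) 1)
-- 'for j in range(col, 9): if m[row][j] != 0: m[row][j] = 0; break' on one row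
def scanClearA (row : List Int) (j : Nat) : Option (List Int) :=
  if j < 9 then
    (if row.getD j 0 ≠ 0 then some (row.set j 0) else scanClearA row (j + 1))
  else none
termination_by 9 - j
-- one opponent card: the body of A's outer loop (flag logic)
def stepA (tr : Nat) (m : List (List Int)) (item : String) : Option (List (List Int)) :=
  let row := ranksA (pvChA item 1)
  let col := suitsA (pvChA item 0)
  match scanClearA (m.getD row []) col with
  | some r' => some (m.set row r')
  | none =>
    if row ≠ tr then
      match scanClearA (m.getD tr []) 0 with
      | some r' => some (m.set tr r')
      | none => none
    else none
def loopA (tr : Nat) (m : List (List Int)) : List String → String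
  | [] => "YES"
  | item :: rest =>
    match stepA tr m item with
    | some m' => loopA tr m' rest
    | none => "NO"
def durak (trump_card : String) (me : List String) (opponent : List String) : String :=
  loopA (ranksA (pvChA trump_card 0))
    (me.foldl markA (List.replicate 4 (List.replicate 9 (0 : Int)))) opponent

-- ===== PORT B =====
def pvChB (s : String) (i : Nat) : Char := s.toList.getD i '?'
-- SUIT[·]
def suitB (c : Char) : Nat :=
  if c = 'S' then 0 else if c = 'C' then 1 else if c = 'D' then 2 else if c = 'H' then 3 else 0
-- RANK[·]
def rankB (c : Char) : Nat :=
  if c = '6' then 0 else if c = '7' then 1 else if c = '8' then 2 else if c = '9' then 3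
  else if c = 'T' then 4 else if c = 'J' then 5 else if c = 'Q' then 6 else if c = 'K' then 7
  else if c = 'A' then 8 else 0
-- present = {(SUIT[c[1]], RANK[c[0]]) for c in me}
def presentB (me : List String) : PySem.Set (Nat × Nat) :=
  me.foldl (fun st c => PySem.Set.add st (suitB (pvChB c 1), rankB (pvChB c 0))) PySem.Set.empty
-- avail = [[r for r in range(9) if (s, r) in present] for s in range(4)]
def availB (present : PySem.Set (Nat × Nat)) : List (List Nat) :=
  (List.range 4).map (fun s => (List.range 9).filter (fun r => PySem.Set.contains present (s, r)))
-- _bisect_left's while-loop (hand-written binary search, ported step for step)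
def blGo (a : List Nat) (x : Nat) (lo hi : Nat) : Nat :=
  if lo < hi then
    let mid := (lo + hi) / 2
    if a.getD mid 0 < x then blGo a x (mid + 1) hi else blGo a x lo mid
  else lo
termination_by hi - lo
decreasing_by all_goals omega
def bisectLeftB (a : List Nat) (x : Nat) : Nat := blGo a x 0 a.length
-- the body of B's loop over opponent (SUIT[trump_card] evaluated lazily, as in Source B)
def stepB (trump_card : String) (av : List (List Nat)) (c : String) : Option (List (List Nat)) :=
  let s := suitB (pvChB c 1)
  let r := rankB (pvChB c 0)
  let lst := av.getD s []
  let i := bisectLeftB lst r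
  if i < lst.length then some (av.set s (lst.eraseIdx i))
  else
    let t := suitB (pvChB trump_card 0)
    if s ≠ t ∧ av.getD t [] ≠ [] then some (av.set t ((av.getD t []).eraseIdx 0))
    else none
def loopB (trump_card : String) (av : List (List Nat)) : List String → String
  | [] => "YES"
  | c :: rest =>
    match stepB trump_card av c with
    | some av' => loopB trump_card av' rest
    | none => "NO"
def durak_alt (trump_card : String) (me : List String) (opponent : List String) : String :=
  loopB trump_card (availB (presentB me)) opponent

-- ===== PRECONDITION & SPEC =====
-- Pre_ excludes the inputs where the Python raises KeyError/IndexError (an invalid card string, or an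
-- invalid trump_card while opponent is nonempty). This closed form also excludes some inputs A returns
-- on — an invalid trump_card that is never consulted (every opponent card beaten in suit), and invalid
-- opponent cards lying after A's early 'NO' exit — A and B agree (and the ports are faithful) there too.
def Pre_durak (trump_card : String) (me : List String) (opponent : List String) : Prop :=
  (∀ c ∈ me ++ opponent,
      2 ≤ c.toList.length ∧
      c.toList.getD 0 '?' ∈ ['6', '7', '8', '9', 'T', 'J', 'Q', 'K', 'A'] ∧
      c.toList.getD 1 '?' ∈ ['S', 'C', 'D', 'H']) ∧
  (trump_card ∈ ["S", "C", "D", "H"] ∨ opponent = [])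
instance (trump_card : String) (me : List String) (opponent : List String) : Decidable (Pre_durak trump_card me opponent) := by unfold Pre_durak; infer_instance
def pvWitness_durak : String × List String × List String := ("S", ["6S", "AC"], ["6C", "7S"])
def Spec_durak (trump_card : String) (me : List String) (opponent : List String) (out : String) : Prop := out = durak_alt trump_card me opponent
instance (trump_card : String) (me : List String) (opponent : List String) (out : String) : Decidable (Spec_durak trump_card me opponent out) := by unfold Spec_durak; infer_instance

-- ===== CLAIM (what is proved, stated in full; the proofs are below) =====
def Claim_equal_durak : Prop := ∀ (trump_card : String) (me : List String) (opponent : List String), Dom_durak trump_card me opponent → Pre_durak trump_card me opponent → Spec_durak trump_card me opponent (durak trump_card me opponent)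

-- ===== LEMMAS AND PROOFS =====

theorem durak_witness_ok :
    Dom_durak pvWitness_durak.1 pvWitness_durak.2.1 pvWitness_durak.2.2 ∧
    Pre_durak pvWitness_durak.1 pvWitness_durak.2.1 pvWitness_durak.2.2 := by decide

-- shape invariant of A's matrix
def InvMA (m : List (List Int)) : Prop := m.length = 4 ∧ ∀ row ∈ m, row.length = 9

-- the abstraction tying B's per-suit lists to A's matrix
def RelAB (m : List (List Int)) (av : List (List Nat)) : Prop :=
  av.length = 4 ∧
  ∀ s, s < 4 →
    av.getD s [] = (List.range 9).filter (fun r => decide ((m.getD s []).getD r 0 ≠ 0))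

theorem ranksA_lt (c : Char) : ranksA c < 4 := by
  unfold ranksA; split_ifs <;> omega

theorem suitsA_lt (c : Char) : suitsA c < 9 := by
  unfold suitsA; split_ifs <;> omega

theorem suitB_eq (c : Char) : suitB c = ranksA c := rfl
theorem rankB_eq (c : Char) : rankB c = suitsA c := rfl
theorem pvChB_eq (s : String) (i : Nat) : pvChB s i = pvChA s i := rfl

theorem getD_set_self {α : Type} (l : List α) (i : Nat) (a d : α) (h : i < l.length) :
    (l.set i a).getD i d = a := by
  simp [List.getD_eq_getElem?_getD, h]

theorem getD_set_ne {α : Type} (l : List α) (i j : Nat) (a d : α) (h : i ≠ j) :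
    (l.set i a).getD j d = l.getD j d := by
  simp [List.getD_eq_getElem?_getD, List.getElem?_set_ne h]

theorem getD_mem {α : Type} (l : List α) (i : Nat) (d : α) (h : i < l.length) :
    l.getD i d ∈ l := by
  rw [List.getD_eq_getElem?_getD, List.getElem?_eq_getElem h]
  exact List.getElem_mem h

theorem InvMA_set (m : List (List Int)) (row : Nat) (v : List Int)
    (hm : InvMA m) (hv : v.length = 9) : InvMA (m.set row v) := by
  obtain ⟨h1, h2⟩ := hm
  refine ⟨by simpa using h1, ?_⟩
  intro r hr
  rcases List.mem_or_eq_of_mem_set hr with h | h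
  · exact h2 r h
  · simpa [h] using hv

-- characterisation of A's inner scan: it finds the head of the filtered tail range
theorem scanClearA_eq (row : List Int) (col : Nat) (h : col ≤ 9) :
    scanClearA row col =
      match (List.range' col (9 - col)).filter (fun j => decide (row.getD j 0 ≠ 0)) with
      | [] => none
      | j0 :: _ => some (row.set j0 0) := by
  induction hf : 9 - col generalizing col with
  | zero =>
    have : ¬ col < 9 := by omega
    rw [scanClearA]
    simp [this]
  | succ n ih =>
    have hc : col < 9 := by omega
    rw [scanClearA, List.range'_succ]
    have h9 : (9 : Nat) - (col + 1) = n := by omega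
    by_cases hp : row.getD col 0 ≠ 0
    · have hp' : ¬(row[col]?.getD 0 = 0) := by
        simpa [List.getD_eq_getElem?_getD] using hp
      simp [hc, hp']
    · have hp' : (row[col]?.getD 0 = 0) := by
        simpa [List.getD_eq_getElem?_getD] using hp
      rw [if_pos hc, if_neg hp, ih (col + 1) (by omega) h9]
      simp [hp']

-- binary search on L1 ++ L2 (all of L1 < x ≤ all of L2) lands exactly at |L1|
theorem blGo_append (L1 L2 : List Nat) (x lo hi : Nat)
    (h1 : ∀ a ∈ L1, a < x) (h2 : ∀ a ∈ L2, x ≤ a)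
    (hlo : lo ≤ L1.length) (hhi : L1.length ≤ hi) (hle : hi ≤ L1.length + L2.length) :
    blGo (L1 ++ L2) x lo hi = L1.length := by
  induction hd : hi - lo using Nat.strong_induction_on generalizing lo hi with
  | _ d ih =>
  by_cases hlt : lo < hi
  · have hmid1 : lo ≤ (lo + hi) / 2 := by omega
    have hmid2 : (lo + hi) / 2 < hi := by omega
    set mid := (lo + hi) / 2 with hmiddef
    have hmlen : mid < (L1 ++ L2).length := by
      simp only [List.length_append]; omega
    rw [blGo]
    simp only [hlt, if_true]
    by_cases hcmp : (L1 ++ L2).getD mid 0 < x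
    · have hmidL1 : mid < L1.length := by
        by_contra hge
        push Not at hge
        have : (L1 ++ L2).getD mid 0 = (L1 ++ L2)[mid] := List.getD_eq_getElem _ _ hmlen
        rw [List.getElem_append_right hge] at this
        have hmem : L2[mid - L1.length] ∈ L2 := List.getElem_mem _
        have := h2 _ hmem
        omega
      simp only [← hmiddef, hcmp, if_true]
      exact ih (hi - (mid + 1)) (by omega) (mid + 1) hi (by omega) (by omega) hle rfl
    · have hmidL1 : L1.length ≤ mid := by
        by_contra hgt
        push Not at hgt
        have heq : (L1 ++ L2).getD mid 0 = (L1 ++ L2)[mid] := List.getD_eq_getElem _ _ hmlen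
        rw [List.getElem_append_left hgt] at heq
        have hmem : L1[mid] ∈ L1 := List.getElem_mem _
        have := h1 _ hmem
        omega
      simp only [← hmiddef, hcmp, if_false]
      exact ih (mid - lo) (by omega) lo mid hlo hmidL1 (by omega) rfl
  · have : lo = L1.length := by omega
    rw [blGo, if_neg hlt]
    exact this

theorem bisectLeftB_append (L1 L2 : List Nat) (x : Nat)
    (h1 : ∀ a ∈ L1, a < x) (h2 : ∀ a ∈ L2, x ≤ a) :
    bisectLeftB (L1 ++ L2) x = L1.length := by
  unfold bisectLeftB
  exact blGo_append L1 L2 x 0 (L1 ++ L2).length h1 h2 (by omega)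
    (by simp) (by simp)

theorem eraseIdx_append_cons {α : Type} (L1 : List α) (a : α) (L2 : List α) :
    (L1 ++ a :: L2).eraseIdx L1.length = L1 ++ L2 := by
  induction L1 with
  | nil => rfl
  | cons b t ih => simpa [List.eraseIdx] using ih

theorem range_split (col : Nat) (h : col ≤ 9) :
    List.range 9 = List.range col ++ List.range' col (9 - col) := by
  rw [List.range_eq_range', List.range_eq_range']
  have happ := @List.range'_append 0 col (9 - col) 1
  simp only [Nat.one_mul, Nat.zero_add] at happ
  rw [happ]
  congr 1
  omega

-- one opponent card: the two step functions act in lock-step through the abstraction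
theorem step_rel (trump_card : String) (m : List (List Int)) (av : List (List Nat))
    (item : String) (hinv : InvMA m) (hrel : RelAB m av) :
    (stepA (ranksA (pvChA trump_card 0)) m item = none ∧ stepB trump_card av item = none) ∨
    (∃ m' av', stepA (ranksA (pvChA trump_card 0)) m item = some m' ∧
      stepB trump_card av item = some av' ∧ InvMA m' ∧ RelAB m' av') := by
  obtain ⟨hlen4, hrow9⟩ := hinv
  obtain ⟨havlen, hav⟩ := hrel
  set tr := ranksA (pvChA trump_card 0) with htrdef
  have htr4 : tr < 4 := ranksA_lt _
  have key : ∀ row col, row < 4 → col ≤ 9 →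
      -- shared analysis of one scan/bisect on row starting at col
      (let R := m.getD row []
       let p : Nat → Bool := fun r => decide (R.getD r 0 ≠ 0)
       let L1 := (List.range col).filter p
       let L2 := (List.range' col (9 - col)).filter p
       av.getD row [] = L1 ++ L2 ∧
       bisectLeftB (av.getD row []) col = L1.length ∧
       scanClearA R col = (match L2 with | [] => none | j0 :: _ => some (R.set j0 0)) ∧
       (∀ j0 t2, L2 = j0 :: t2 →
          RelAB (m.set row (R.set j0 0)) (av.set row (L1 ++ t2)) ∧
          InvMA (m.set row (R.set j0 0)))) := by
    intro row col hrow4 hcol9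
    intro R p L1 L2
    have hR9 : R.length = 9 := hrow9 _ (getD_mem m row [] (by omega))
    have hsplit : av.getD row [] = L1 ++ L2 := by
      rw [hav row hrow4, range_split col hcol9, List.filter_append]
    have h1 : ∀ a ∈ L1, a < col := fun a ha => List.mem_range.mp (List.mem_filter.mp ha).1
    have h2 : ∀ a ∈ L2, col ≤ a := fun a ha => (List.mem_range'_1.mp (List.mem_filter.mp ha).1).1
    refine ⟨hsplit, ?_, scanClearA_eq R col hcol9, ?_⟩
    · rw [hsplit]; exact bisectLeftB_append L1 L2 col h1 h2
    · intro j0 t2 hL2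
      have hj0mem : j0 ∈ List.range' col (9 - col) := by
        have : j0 ∈ L2 := by rw [hL2]; exact List.mem_cons_self
        exact (List.mem_filter.mp this).1
      have hj0 : j0 < 9 := by
        have := List.mem_range'_1.mp hj0mem; omega
      have hj0col : col ≤ j0 := (List.mem_range'_1.mp hj0mem).1
      have hj0R : j0 < R.length := by omega
      constructor
      · constructor
        · simpa using havlen
        · intro s hs4
          by_cases hsrow : s = row
          · subst hsrow
            have hsav : s < av.length := by omega
            rw [getD_set_self av s (L1 ++ t2) [] hsav,
                getD_set_self m s (R.set j0 0) [] (by omega)]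
            -- new row's filter is L1 ++ t2
            have hpnew : ∀ r, r < 9 →
                (decide ((R.set j0 0).getD r 0 ≠ 0)) = (decide (r ≠ j0) && p r) := by
              intro r hr9
              by_cases hrj : r = j0
              · subst hrj
                rw [getD_set_self R r 0 0 (by omega)]
                simp
              · rw [getD_set_ne R j0 r 0 0 (fun h => hrj h.symm)]
                simp [hrj, p]
            rw [range_split col hcol9, List.filter_append]
            have hfil1 : (List.range col).filter
                (fun r => decide ((R.set j0 0).getD r 0 ≠ 0)) = L1 := by
              apply List.filter_congr
              intro r hr
              have hrc : r < col := List.mem_range.mp hr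
              rw [hpnew r (by omega)]
              have : r ≠ j0 := by omega
              simp [this]
            have hfil2 : (List.range' col (9 - col)).filter
                (fun r => decide ((R.set j0 0).getD r 0 ≠ 0)) = t2 := by
              have hcongr : (List.range' col (9 - col)).filter
                  (fun r => decide ((R.set j0 0).getD r 0 ≠ 0)) =
                  (List.range' col (9 - col)).filter (fun r => decide (r ≠ j0) && p r) := by
                apply List.filter_congr
                intro r hr
                have := List.mem_range'_1.mp hr
                exact hpnew r (by omega)
              rw [hcongr, ← List.filter_filter]
              have : (List.range' col (9 - col)).filter p = j0 :: t2 := hL2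
              rw [this]
              have hnd : (j0 :: t2).Nodup := by
                rw [← this]
                exact (List.nodup_range').filter _
              have hj0t2 : j0 ∉ t2 := (List.nodup_cons.mp hnd).1
              simp only [List.filter_cons]
              simp only [decide_eq_true_eq]
              rw [if_neg (by simp)]
              apply List.filter_eq_self.mpr
              intro a ha
              simp only [decide_eq_true_eq]
              intro haj; exact hj0t2 (haj ▸ ha)
            rw [hfil1, hfil2]
          · rw [getD_set_ne av row s (L1 ++ t2) [] (fun h => hsrow h.symm),
                getD_set_ne m row s (R.set j0 0) [] (fun h => hsrow h.symm)]
            exact hav s hs4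
      · exact InvMA_set m row (R.set j0 0) ⟨hlen4, hrow9⟩ (by simpa using hR9)
  -- now run both steps
  set row := ranksA (pvChA item 1) with hrowdef
  set col := suitsA (pvChA item 0) with hcoldef
  have hrow4 : row < 4 := ranksA_lt _
  have hcol9 : col ≤ 9 := le_of_lt (suitsA_lt _)
  obtain ⟨hsplit, hbis, hscan, hupd⟩ := key row col hrow4 hcol9
  obtain ⟨hsplitT, hbisT, hscanT, hupdT⟩ := key tr 0 htr4 (by omega)
  simp only [Nat.sub_zero] at hsplitT hbisT hscanT hupdT
  -- abbreviations
  set R := m.getD row [] with hRdef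
  set p : Nat → Bool := fun r => decide ((m.getD row []).getD r 0 ≠ 0) with hpdef
  set L1 := (List.range col).filter p with hL1def
  set L2 := (List.range' col (9 - col)).filter p with hL2def
  set pT : Nat → Bool := fun r => decide ((m.getD tr []).getD r 0 ≠ 0) with hpTdef
  set FT := (List.range' 0 9).filter pT with hFTdef
  have hstepB : stepB trump_card av item =
      (if bisectLeftB (av.getD row []) col < (av.getD row []).length then
        some (av.set row ((av.getD row []).eraseIdx (bisectLeftB (av.getD row []) col)))
      else if row ≠ tr ∧ av.getD tr [] ≠ [] then
        some (av.set tr ((av.getD tr []).eraseIdx 0))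
      else none) := by
    rfl
  cases hL2c : L2 with
  | cons j0 t2 =>
    -- in-suit beat succeeds on both sides
    right
    have hlenlt : bisectLeftB (av.getD row []) col < (av.getD row []).length := by
      rw [hbis, hsplit, hL2c]; simp
    have herase : (av.getD row []).eraseIdx (bisectLeftB (av.getD row []) col) = L1 ++ t2 := by
      rw [hbis, hsplit, hL2c]
      exact eraseIdx_append_cons L1 j0 t2
    obtain ⟨hrel', hinv'⟩ := hupd j0 t2 hL2c
    refine ⟨m.set row (R.set j0 0), av.set row (L1 ++ t2), ?_, ?_, hinv', hrel'⟩
    · simp only [stepA, ← hrowdef, ← hcoldef, ← hRdef]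
      rw [hscan, hL2c]
    · rw [hstepB, if_pos hlenlt, herase]
  | nil =>
    -- in-suit beat fails; try the trump row
    have hlennot : ¬ bisectLeftB (av.getD row []) col < (av.getD row []).length := by
      rw [hbis, hsplit, hL2c]; simp
    have hscannone : scanClearA R col = none := by rw [hscan, hL2c]
    by_cases hrt : row = tr
    · left
      constructor
      · simp only [stepA, ← hrowdef, ← hcoldef, ← hRdef]
        rw [hscannone]
        simp [hrt]
      · rw [hstepB, if_neg hlennot, if_neg (by simp [hrt])]
    · cases hFTc : FT with
      | nil =>
        left
        constructor
        · simp only [stepA, ← hrowdef, ← hcoldef, ← hRdef]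
          rw [hscannone]
          simp only [hrt, ne_eq, not_false_iff, if_true]
          rw [hscanT, hFTc]
        · rw [hstepB, if_neg hlennot, if_neg]
          rw [hsplitT, hFTc]
          simp
      | cons j0 t2 =>
        right
        obtain ⟨hrelT', hinvT'⟩ := hupdT j0 t2 hFTc
        have hTfilnil : ((List.range 0).filter pT : List Nat) = [] := rfl
        refine ⟨m.set tr ((m.getD tr []).set j0 0), av.set tr ([] ++ t2), ?_, ?_, ?_, ?_⟩
        · simp only [stepA, ← hrowdef, ← hcoldef, ← hRdef]
          rw [hscannone]
          simp only [hrt, ne_eq, not_false_iff, if_true]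
          rw [hscanT, hFTc]
        · rw [hstepB, if_neg hlennot, if_pos]
          · congr 1
            rw [hsplitT, hFTc]
            simp
          · refine ⟨hrt, ?_⟩
            rw [hsplitT, hFTc]; simp
        · simpa using hinvT'
        · simpa using hrelT'
  -- end step_rel

theorem loop_rel (trump_card : String) (ops : List String) :
    ∀ m av, InvMA m → RelAB m av →
    loopA (ranksA (pvChA trump_card 0)) m ops = loopB trump_card av ops := by
  induction ops with
  | nil => intro m av _ _; rfl
  | cons item rest ih =>
    intro m av hinv hrel
    rcases step_rel trump_card m av item hinv hrel with ⟨ha, hb⟩ | ⟨m', av', ha, hb, hinv', hrel'⟩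
    · simp [loopA, loopB, ha, hb]
    · simp only [loopA, loopB, ha, hb]
      exact ih m' av' hinv' hrel'

theorem build_rel (me : List String) :
    InvMA (me.foldl markA (List.replicate 4 (List.replicate 9 (0 : Int)))) ∧
    RelAB (me.foldl markA (List.replicate 4 (List.replicate 9 (0 : Int))))
      (availB (presentB me)) := by
  -- generalized fold invariant over me
  suffices h : ∀ (me : List String) (m : List (List Int)) (st : PySem.Set (Nat × Nat)),
      InvMA m →
      (∀ s r, s < 4 → r < 9 → ((s, r) ∈ st ↔ (m.getD s []).getD r 0 ≠ 0)) →
      InvMA (me.foldl markA m) ∧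
      (∀ s r, s < 4 → r < 9 →
        ((s, r) ∈ me.foldl
            (fun st c => PySem.Set.add st (suitB (pvChB c 1), rankB (pvChB c 0))) st ↔
          ((me.foldl markA m).getD s []).getD r 0 ≠ 0)) by
    have hbase : InvMA (List.replicate 4 (List.replicate 9 (0 : Int))) := by
      constructor
      · simp
      · intro row hr
        have := List.eq_of_mem_replicate hr
        simp [this]
    have hbase2 : ∀ s r, s < 4 → r < 9 →
        ((s, r) ∈ (PySem.Set.empty : PySem.Set (Nat × Nat)) ↔
          ((List.replicate 4 (List.replicate 9 (0 : Int))).getD s []).getD r 0 ≠ 0) := by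
      intro s r hs hr
      constructor
      · intro hmem; cases hmem
      · intro hne
        exfalso
        apply hne
        have h1 : (List.replicate 4 (List.replicate 9 (0 : Int))).getD s [] =
            List.replicate 9 (0 : Int) := by
          rw [List.getD_eq_getElem?_getD, List.getElem?_replicate]
          simp [hs]
        rw [h1, List.getD_eq_getElem?_getD, List.getElem?_replicate]
        simp [hr]
    obtain ⟨hinv, hiff⟩ := h me (List.replicate 4 (List.replicate 9 (0 : Int)))
      PySem.Set.empty hbase hbase2
    refine ⟨hinv, ?_, ?_⟩
    · simp [availB]
    · intro s hs4
      have : (availB (presentB me)).getD s [] =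
          (List.range 9).filter (fun r => PySem.Set.contains (presentB me) (s, r)) := by
        unfold availB
        rw [List.getD_eq_getElem?_getD, List.getElem?_map, List.getElem?_range hs4]
        rfl
      rw [this]
      apply List.filter_congr
      intro r hr
      have hr9 : r < 9 := List.mem_range.mp hr
      have := hiff s r hs4 hr9
      unfold presentB
      rw [Bool.eq_iff_iff, PySem.Set.contains_iff, decide_eq_true_eq]
      exact this
  intro me
  induction me with
  | nil => intro m st hinv hiff; exact ⟨hinv, hiff⟩
  | cons c rest ih =>
    intro m st hinv hiff
    simp only [List.foldl_cons]
    apply ih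
    · -- shape preserved by markA
      have hrow4 : ranksA (pvChA c 1) < 4 := ranksA_lt _
      have hlt : ranksA (pvChA c 1) < m.length := by
        rw [hinv.1]; exact ranksA_lt _
      have hR9 : (m.getD (ranksA (pvChA c 1)) []).length = 9 :=
        hinv.2 _ (getD_mem m _ [] hlt)
      unfold markA
      exact InvMA_set m _ _ hinv (by simpa using hR9)
    · -- membership iff preserved
      intro s r hs4 hr9
      set s0 := ranksA (pvChA c 1) with hs0
      set r0 := suitsA (pvChA c 0) with hr0
      have hs04 : s0 < 4 := ranksA_lt _
      have hr09 : r0 < 9 := suitsA_lt _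
      have hs0lt : s0 < m.length := by rw [hinv.1]; exact ranksA_lt _
      have hR9 : (m.getD s0 []).length = 9 :=
        hinv.2 _ (getD_mem m s0 [] hs0lt)
      have hmem : (s, r) ∈ PySem.Set.add st (suitB (pvChB c 1), rankB (pvChB c 0)) ↔
          (s, r) ∈ st ∨ (s, r) = (s0, r0) := by
        rw [PySem.Set.mem_add]
        simp [← suitB_eq, ← rankB_eq, ← pvChB_eq, hs0, hr0]
      rw [hmem]
      unfold markA
      by_cases hss : s = s0
      · subst hss
        rw [getD_set_self m s0 _ [] hs0lt]
        by_cases hrr : r = r0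
        · subst hrr
          rw [getD_set_self (m.getD s0 []) r0 1 0 (by rw [hR9]; exact hr09)]
          simp
        · rw [getD_set_ne (m.getD s0 []) r0 r 1 0 (fun h => hrr h.symm)]
          rw [hiff s0 r hs04 hr9]
          simp [hrr]
      · rw [getD_set_ne m s0 s _ [] (fun h => hss h.symm)]
        rw [hiff s r hs4 hr9]
        simp [Prod.ext_iff, hss]

-- ===== VERDICT (by name: the statement is the Claim_ definition above) =====
theorem durak_spec : Claim_equal_durak := by
  intro trump_card me opponent _ _
  unfold Spec_durak durak durak_alt
  obtain ⟨hinv, hrel⟩ := build_rel me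
  exact loop_rel trump_card opponent _ _ hinv hrel
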